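-- pv_equiv track=rewrite | github.com/TyberiusPrime/dppd_plotnine | src/dppd_plotnine/dppd_plotnine.py | sensible_aes_order
-- ===== SOURCE A (Python) =====
-- def sensible_aes_order(required_aes):
--     order = []
--     if "x" in required_aes:
--         order.append("x")
--     if "y" in required_aes:
--         order.append("y")
--     for a in sorted(required_aes):
--         if a != "x" and a != "y":
--             order.append(a)
--     return order
-- ===== SOURCE B (Python) =====
-- def sensible_aes_order(required_aes):
--     return sorted(required_aes, key=lambda a: (0 if a == "x" else 1 if a == "y" else 2, a))
-- ===== Notes on version B (the rewrite author's own statement) =====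
-- stated objective: idiomatic
-- what changed: Replaces the two-phase build (membership-guarded x/y prefix plus a filtering loop over a sorted copy) with a single keyed sort ranking 'x' first, 'y' second, the rest by name; since required_aes is a Python set it never holds duplicates, and Pre_ merely states that fact ('x'/'y' occur at most once) for the List String encoding, excluding no actual input.
import Mathlib
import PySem

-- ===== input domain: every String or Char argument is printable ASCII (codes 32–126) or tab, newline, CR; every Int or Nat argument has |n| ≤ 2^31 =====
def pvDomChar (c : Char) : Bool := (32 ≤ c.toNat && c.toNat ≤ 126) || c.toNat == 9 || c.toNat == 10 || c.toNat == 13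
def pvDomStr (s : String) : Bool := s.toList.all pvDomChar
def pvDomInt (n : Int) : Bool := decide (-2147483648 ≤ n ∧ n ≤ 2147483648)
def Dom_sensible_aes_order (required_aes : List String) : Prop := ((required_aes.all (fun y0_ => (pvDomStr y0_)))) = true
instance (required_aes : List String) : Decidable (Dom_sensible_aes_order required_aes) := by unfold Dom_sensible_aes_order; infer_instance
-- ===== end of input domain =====

-- B replaces A's two-phase build (guarded "x"/"y" prefix + filtering loop over a sorted copy)
-- by a single keyed sort; objective: idiomatic, same value on every input admitted by Pre_.

-- ===== PORT A =====
def sensible_aes_order (required_aes : List String) : List String :=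
  let order : List String := []
  let order := if "x" ∈ required_aes then order ++ ["x"] else order
  let order := if "y" ∈ required_aes then order ++ ["y"] else order
  (PySem.List.sorted required_aes (fun a => a) false).foldl
    (fun acc a => if a ≠ "x" ∧ a ≠ "y" then acc ++ [a] else acc) order

-- ===== PORT B =====
-- first component of B's sort key: 0 if a == "x" else 1 if a == "y" else 2
def pvRank (a : String) : Int := if a = "x" then 0 else if a = "y" then 1 else 2

def sensible_aes_order_alt (required_aes : List String) : List String :=
  PySem.List.sorted2 required_aes pvRank (fun a => a) false

-- ===== PRECONDITION & SPEC =====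
-- required_aes is a Python set, so its List String encoding never holds duplicates; Pre_
-- states just the part of that fact the proof needs ("x" and "y" occur at most once) and
-- therefore excludes no actual input.
def Pre_sensible_aes_order (required_aes : List String) : Prop :=
  required_aes.count "x" ≤ 1 ∧ required_aes.count "y" ≤ 1
instance (required_aes : List String) : Decidable (Pre_sensible_aes_order required_aes) := by unfold Pre_sensible_aes_order; infer_instance
def pvWitness_sensible_aes_order : List String := ["y", "color", "x", "alpha"]

def Spec_sensible_aes_order (required_aes : List String) (out : List String) : Prop := out = sensible_aes_order_alt required_aes
instance (required_aes : List String) (out : List String) : Decidable (Spec_sensible_aes_order required_aes out) := by unfold Spec_sensible_aes_order; infer_instance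

-- ===== CLAIM (what is proved, stated in full; the proofs are below) =====
def Claim_equal_sensible_aes_order : Prop := ∀ (required_aes : List String), Dom_sensible_aes_order required_aes → Pre_sensible_aes_order required_aes → Spec_sensible_aes_order required_aes (sensible_aes_order required_aes)

-- ===== LEMMAS AND PROOFS =====

-- The total sort key both outputs are ordered by: ("x" first, "y" second, rest by name).
def pvKey (a : String) : Lex (Int × String) := toLex (pvRank a, a)

theorem pvKey_injective : Function.Injective pvKey := by
  intro a b h
  exact congrArg (fun t => (ofLex t).2) h

theorem pv_insertBy_nil {α : Type} (before : α → α → Bool) (x : α) :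
    PySem.List.insertBy before x [] = [x] := rfl

theorem pv_insertBy_cons {α : Type} (before : α → α → Bool) (x y : α) (ys : List α) :
    PySem.List.insertBy before x (y :: ys) =
      if before x y then x :: y :: ys else y :: PySem.List.insertBy before x ys := rfl

theorem pv_insertBy_pairwise {α κ : Type} [LinearOrder κ] (key : α → κ) (x : α) :
    ∀ (l : List α), l.Pairwise (fun a b => key a ≤ key b) →
      (PySem.List.insertBy (fun a b => decide (key a < key b)) x l).Pairwise
        (fun a b => key a ≤ key b) := by
  intro l
  induction l with
  | nil => intro _; simp [pv_insertBy_nil]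
  | cons y ys ih =>
    intro h
    rw [List.pairwise_cons] at h
    rw [pv_insertBy_cons]
    by_cases hxy : key x < key y
    · simp only [hxy, decide_true, if_true]
      refine List.Pairwise.cons ?_ (List.Pairwise.cons h.1 h.2)
      intro b hb
      rcases List.mem_cons.mp hb with rfl | hb'
      · exact le_of_lt hxy
      · exact le_of_lt (lt_of_lt_of_le hxy (h.1 b hb'))
    · simp only [hxy, decide_false]
      refine List.Pairwise.cons ?_ (ih h.2)
      intro b hb
      rcases (PySem.List.mem_insertBy _ _ _ _).mp hb with rfl | hb'
      · exact le_of_not_gt hxy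
      · exact h.1 b hb'

theorem pv_foldl_insertBy_pairwise {α κ : Type} [LinearOrder κ] (key : α → κ) :
    ∀ (xs acc : List α), acc.Pairwise (fun a b => key a ≤ key b) →
      (xs.foldl (fun acc x => PySem.List.insertBy (fun a b => decide (key a < key b)) x acc) acc).Pairwise
        (fun a b => key a ≤ key b) := by
  intro xs
  induction xs with
  | nil => intro acc h; exact h
  | cons x xs ih => intro acc h; exact ih _ (pv_insertBy_pairwise key x acc h)

theorem pv_cmp_eq (a b : String) :
    (decide (pvRank a < pvRank b) || (!decide (pvRank b < pvRank a) && decide (a < b)))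
      = decide (pvKey a < pvKey b) := by
  by_cases h1 : pvRank a < pvRank b <;> by_cases h2 : pvRank b < pvRank a <;>
    by_cases h3 : a < b <;>
    simp [pvKey, Prod.Lex.lt_iff, h1, h2, h3] <;> omega

theorem pv_alt_eq_foldl (xs : List String) :
    sensible_aes_order_alt xs =
      xs.foldl (fun acc x => PySem.List.insertBy (fun a b => decide (pvKey a < pvKey b)) x acc) [] := by
  have hfun : (fun (a b : String) =>
      (decide (pvRank a < pvRank b) || (!decide (pvRank b < pvRank a) && decide (a < b))))
      = fun a b => decide (pvKey a < pvKey b) := by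
    funext a b; exact pv_cmp_eq a b
  show xs.foldl (fun acc x => PySem.List.insertBy (fun a b =>
      (decide (pvRank a < pvRank b) || (!decide (pvRank b < pvRank a) && decide (a < b)))) x acc) []
    = _
  rw [hfun]

theorem pv_alt_pairwise (xs : List String) :
    (sensible_aes_order_alt xs).Pairwise (fun a b => pvKey a ≤ pvKey b) := by
  rw [pv_alt_eq_foldl]
  exact pv_foldl_insertBy_pairwise pvKey xs [] List.Pairwise.nil

theorem pv_a_eq (xs : List String) :
    sensible_aes_order xs =
      ((if "x" ∈ xs then ["x"] else []) ++ (if "y" ∈ xs then ["y"] else [])) ++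
        ((PySem.List.sorted xs (fun a => a) false).filter
          (fun a => decide (a ≠ "x" ∧ a ≠ "y"))) := by
  unfold sensible_aes_order
  have hfun : (fun (acc : List String) (a : String) => if a ≠ "x" ∧ a ≠ "y" then acc ++ [a] else acc)
      = fun acc a => if (fun a => decide (a ≠ "x" ∧ a ≠ "y")) a = true then acc ++ [(fun (a : String) => a) a] else acc := by
    funext acc a; simp
  rw [hfun, PySem.List.foldl_append_if]
  by_cases hx : "x" ∈ xs <;> by_cases hy : "y" ∈ xs <;> simp [hx, hy]

theorem pv_rank_of_ne (a : String) (hax : a ≠ "x") (hay : a ≠ "y") : pvRank a = 2 := by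
  simp [pvRank, hax, hay]

theorem pv_key_le_of_rank_lt {a b : String} (h : pvRank a < pvRank b) : pvKey a ≤ pvKey b := by
  rw [pvKey, pvKey, Prod.Lex.le_iff]; exact Or.inl h

theorem pv_a_pairwise (xs : List String) :
    (sensible_aes_order xs).Pairwise (fun a b => pvKey a ≤ pvKey b) := by
  rw [pv_a_eq]
  have hfilt : ∀ b ∈ (PySem.List.sorted xs (fun a => a) false).filter
      (fun a => decide (a ≠ "x" ∧ a ≠ "y")), pvRank b = 2 := by
    intro b hb
    rw [List.mem_filter] at hb
    have := hb.2
    simp only [decide_eq_true_eq] at this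
    exact pv_rank_of_ne b this.1 this.2
  rw [List.pairwise_append]
  refine ⟨?_, ?_, ?_⟩
  · rw [List.pairwise_append]
    refine ⟨?_, ?_, ?_⟩
    · by_cases hx : "x" ∈ xs <;> simp [hx]
    · by_cases hy : "y" ∈ xs <;> simp [hy]
    · intro a ha b hb
      by_cases hx : "x" ∈ xs <;> by_cases hy : "y" ∈ xs <;>
        simp [hx, hy] at ha hb
      subst ha; subst hb
      exact pv_key_le_of_rank_lt (by simp [pvRank])
  · have hsorted : ((PySem.List.sorted xs (fun a => a) false).filter
        (fun a => decide (a ≠ "x" ∧ a ≠ "y"))).Pairwise (fun a b => a ≤ b) := by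
      exact List.Pairwise.filter _ (PySem.List.sorted_pairwise xs (fun a => a))
    refine List.Pairwise.imp_of_mem ?_ hsorted
    intro a b ha hb hab
    rw [pvKey, pvKey, Prod.Lex.le_iff]
    exact Or.inr ⟨(hfilt a ha).trans (hfilt b hb).symm, hab⟩
  · intro a ha b hb
    have hb2 : pvRank b = 2 := hfilt b hb
    have : pvRank a < pvRank b := by
      rw [hb2]
      rcases List.mem_append.mp ha with h | h <;>
        [(by_cases hx : "x" ∈ xs <;> simp [hx] at h);
         (by_cases hy : "y" ∈ xs <;> simp [hy] at h)] <;>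
        subst h <;> simp [pvRank]
    exact pv_key_le_of_rank_lt this

theorem pv_a_perm (xs : List String) (h : Pre_sensible_aes_order xs) :
    (sensible_aes_order xs).Perm xs := by
  rw [pv_a_eq, List.perm_iff_count]
  intro c
  set F := (PySem.List.sorted xs (fun a => a) false).filter
      (fun a => decide (a ≠ "x" ∧ a ≠ "y")) with hF
  have hsc : ∀ (d : String), List.count d (PySem.List.sorted xs (fun a => a) false) = List.count d xs :=
    fun d => (PySem.List.sorted_perm xs (fun a => a) false).count_eq d
  have hfzx : List.count "x" F = 0 := by
    rw [List.count_eq_zero, hF]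
    intro hmem
    rw [List.mem_filter] at hmem
    simp at hmem
  have hfzy : List.count "y" F = 0 := by
    rw [List.count_eq_zero, hF]
    intro hmem
    rw [List.mem_filter] at hmem
    simp at hmem
  by_cases hcx : c = "x"
  · subst hcx
    by_cases hx : "x" ∈ xs
    · have h1 : 1 ≤ xs.count "x" := List.count_pos_iff.mpr hx
      have h2 := h.1
      by_cases hy : "y" ∈ xs <;>
        simp only [hx, hy, if_true, if_false, List.count_append, hfzx] <;> simp <;> omega
    · have h0 : xs.count "x" = 0 := List.count_eq_zero.mpr hx
      by_cases hy : "y" ∈ xs <;>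
        simp only [hx, hy, if_true, if_false, List.count_append, hfzx, h0] <;> simp
  · by_cases hcy : c = "y"
    · subst hcy
      by_cases hy : "y" ∈ xs
      · have h1 : 1 ≤ xs.count "y" := List.count_pos_iff.mpr hy
        have h2 := h.2
        by_cases hx : "x" ∈ xs <;>
          simp only [hx, hy, if_true, if_false, List.count_append, hfzy] <;> simp <;> omega
      · have h0 : xs.count "y" = 0 := List.count_eq_zero.mpr hy
        by_cases hx : "x" ∈ xs <;>
          simp only [hx, hy, if_true, if_false, List.count_append, hfzy, h0] <;> simp
    · have hfc : List.count c F = List.count c xs := by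
        rw [hF, List.count_filter (by simp [hcx, hcy])]
        exact hsc c
      by_cases hx : "x" ∈ xs <;> by_cases hy : "y" ∈ xs <;>
        simp only [hx, hy, if_true, if_false, List.count_append, hfc] <;>
        simp [List.count_eq_zero, hcx, hcy]

-- ===== VERDICT (by name: the statement is the Claim_ definition above) =====
theorem sensible_aes_order_spec : Claim_equal_sensible_aes_order := by
  intro xs _ hpre
  unfold Spec_sensible_aes_order
  have hperm : (sensible_aes_order xs).Perm (sensible_aes_order_alt xs) :=
    (pv_a_perm xs hpre).trans (PySem.List.sorted2_perm xs pvRank (fun a => a) false).symm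
  exact PySem.List.eq_of_perm_of_pairwise_le_of_injective pvKey pvKey_injective hperm
    (pv_a_pairwise xs) (pv_alt_pairwise xs)
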